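-- pv_equiv track=rewrite | github.com/p0dxD/Programming-language | Aditional class work/tourism1.py | getViolations
-- ===== SOURCE A (Python) =====
-- def getViolations(listOfPreferences, listToCheckWith):
--     violations = 0
--     for item in listToCheckWith:
--         for i in range(len(listOfPreferences)):
--             if item not in listOfPreferences[i]:
--                 continue
--             for k in listOfPreferences[i][listOfPreferences[i].index(item)+1:]:
--                 if listToCheckWith.index(item) < listToCheckWith.index(k):
--                     violations+=1
--     return violations
-- ===== SOURCE B (Python) =====
-- def getViolations(listOfPreferences, listToCheckWith):
--     firstpos = {}
--     counts = {}
--     for i, v in enumerate(listToCheckWith):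
--         if v not in firstpos:
--             firstpos[v] = i
--         counts[v] = counts.get(v, 0) + 1
--     violations = 0
--     for pref in listOfPreferences:
--         for j, item in enumerate(pref):
--             if item in pref[:j] or item not in firstpos:
--                 continue
--             fi = firstpos[item]
--             for k in pref[j + 1:]:
--                 if fi < firstpos[k]:
--                     violations += counts[item]
--     return violations
-- ===== Notes on version B (the rewrite author's own statement) =====
-- stated objective: faster
-- what changed: B inverts the loop structure: it precomputes a first-position dict and a counts dict of listToCheckWith in one pass, then loops over the preference lists only (skipping non-first occurrences within a list), adding counts[item] per violating successor, instead of A's outer loop over every occurrence in listToCheckWith with repeated O(n) .index scans inside the innermost loop.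
import Mathlib
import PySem

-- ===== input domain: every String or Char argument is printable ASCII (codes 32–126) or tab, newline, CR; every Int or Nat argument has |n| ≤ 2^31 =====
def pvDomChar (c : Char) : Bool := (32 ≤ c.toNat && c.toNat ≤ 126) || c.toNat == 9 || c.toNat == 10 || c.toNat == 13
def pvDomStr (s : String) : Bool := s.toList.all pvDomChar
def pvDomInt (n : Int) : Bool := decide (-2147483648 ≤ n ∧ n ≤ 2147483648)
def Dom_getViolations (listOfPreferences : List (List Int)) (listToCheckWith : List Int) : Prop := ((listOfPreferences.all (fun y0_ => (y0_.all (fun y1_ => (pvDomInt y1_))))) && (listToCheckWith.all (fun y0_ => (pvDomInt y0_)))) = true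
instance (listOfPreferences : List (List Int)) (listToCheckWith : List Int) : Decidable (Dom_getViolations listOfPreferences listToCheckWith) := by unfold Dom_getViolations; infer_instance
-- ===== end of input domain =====

-- B replaces A's occurrence-by-occurrence outer loop over listToCheckWith (with repeated .index
-- scans in the innermost loop) by two precomputed dicts and a single sweep over the preference
-- lists, multiplying each hit by the occurrence count; objective: faster.

-- ===== PORT A =====
def getViolations (listOfPreferences : List (List Int)) (listToCheckWith : List Int) : Int :=
  listToCheckWith.foldl (fun violations item =>
    (PySem.List.pyRange 0 (PySem.List.len listOfPreferences)).foldl (fun violations i =>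
      -- listOfPreferences[i]: i comes from range(len(..)), always in range, so the default is dead
      if ¬ (item ∈ PySem.List.pyGetD listOfPreferences i []) then violations
      else
        -- p.index(item): item ∈ p holds here, so index? is some and `.getD 0` is exact
        (PySem.List.slice (PySem.List.pyGetD listOfPreferences i [])
            (some ((((PySem.List.index? (PySem.List.pyGetD listOfPreferences i []) item).getD 0 : Nat) : Int) + 1)) none).foldl
          (fun violations k =>
            -- listToCheckWith.index(k) raises ValueError when k ∉ listToCheckWith: outside Pre_
            if (PySem.List.index? listToCheckWith item).getD 0 < (PySem.List.index? listToCheckWith k).getD 0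
            then violations + 1 else violations)
          violations)
      violations) 0

-- ===== PORT B =====
def getViolations_alt (listOfPreferences : List (List Int)) (listToCheckWith : List Int) : Int :=
  -- one pass over enumerate(listToCheckWith) builds firstpos and counts (zipIdx pairs are (value, index))
  let fc := listToCheckWith.zipIdx.foldl
      (fun (fc : PySem.Dict Int Int × PySem.Dict Int Int) vi =>
        ((if fc.1.contains vi.1 then fc.1 else fc.1.insert vi.1 (vi.2 : Int)),
         fc.2.insert vi.1 (fc.2.getD vi.1 0 + 1)))
      (PySem.Dict.empty, PySem.Dict.empty)
  let firstpos := fc.1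
  let counts := fc.2
  listOfPreferences.foldl (fun violations pref =>
    pref.zipIdx.foldl (fun violations ij =>
      -- pref[:j] with j = ij.2 from enumerate (0 ≤ j ≤ len) is exactly take j; pref[j+1:] is drop (j+1)
      if ij.1 ∈ pref.take ij.2 ∨ firstpos.contains ij.1 = false then violations
      else
        -- firstpos[k] raises KeyError when k ∉ listToCheckWith: outside Pre_
        (pref.drop (ij.2 + 1)).foldl (fun violations k =>
          if firstpos.getD ij.1 0 < firstpos.getD k 0 then violations + counts.getD ij.1 0 else violations)
          violations)
      violations) 0

-- ===== PRECONDITION & SPEC =====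
-- Pre_ excludes exactly the inputs on which Python A raises ValueError (listToCheckWith.index(k)
-- for a successor k absent from listToCheckWith): no preference list may contain an element that
-- is absent from listToCheckWith after an element that is present.
def Pre_getViolations (listOfPreferences : List (List Int)) (listToCheckWith : List Int) : Prop :=
  ∀ p ∈ listOfPreferences, List.Pairwise (fun a b => a ∈ listToCheckWith → b ∈ listToCheckWith) p
instance (listOfPreferences : List (List Int)) (listToCheckWith : List Int) : Decidable (Pre_getViolations listOfPreferences listToCheckWith) := by unfold Pre_getViolations; infer_instance

def pvWitness_getViolations : List (List Int) × List Int := ([[1, 2], [2, 1]], [2, 1, 2])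

def Spec_getViolations (listOfPreferences : List (List Int)) (listToCheckWith : List Int) (out : Int) : Prop := out = getViolations_alt listOfPreferences listToCheckWith
instance (listOfPreferences : List (List Int)) (listToCheckWith : List Int) (out : Int) : Decidable (Spec_getViolations listOfPreferences listToCheckWith out) := by unfold Spec_getViolations; infer_instance

-- ===== CLAIM (what is proved, stated in full; the proofs are below) =====
def Claim_equal_getViolations : Prop := ∀ (listOfPreferences : List (List Int)) (listToCheckWith : List Int), Dom_getViolations listOfPreferences listToCheckWith → Pre_getViolations listOfPreferences listToCheckWith → Spec_getViolations listOfPreferences listToCheckWith (getViolations listOfPreferences listToCheckWith)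

-- ===== LEMMAS AND PROOFS =====

-- first index of v in l, defaulted to 0 (only read where meaningful)
def pvIdx (l : List Int) (v : Int) : Nat := (PySem.List.index? l v).getD 0

-- the 0/1 contribution of successor k for value c, relative to check = listToCheckWith
def pvTerm (check : List Int) (c k : Int) : Int := if pvIdx check c < pvIdx check k then 1 else 0

-- total contribution of value c from preference list p (suffix after c's first occurrence)
def pvG (check p : List Int) (c : Int) : Int := ((p.drop (pvIdx p c + 1)).map (pvTerm check c)).sum

-- a loop that acts on its accumulator by adding a per-element amount is the sum of those amounts
theorem pv_foldl_eq_sum {α : Type} (l : List α) (f : Int → α → Int) (H : α → Int)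
    (h : ∀ v x, x ∈ l → f v x = v + H x) : ∀ v : Int, l.foldl f v = v + (l.map H).sum := by
  induction l with
  | nil => intro v; simp
  | cons a t ih =>
    intro v
    rw [List.foldl_cons, h v a (List.mem_cons_self), ih (fun v x hx => h v x (List.mem_cons_of_mem _ hx))]
    simp [add_assoc]

-- A's innermost loop is a sum of pvTerm values
theorem pv_foldl_term (check : List Int) (c : Int) (s : List Int) (v : Int) :
    s.foldl (fun acc k =>
        if (PySem.List.index? check c).getD 0 < (PySem.List.index? check k).getD 0
        then acc + 1 else acc) v
      = v + (s.map (pvTerm check c)).sum := by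
  refine pv_foldl_eq_sum s _ (pvTerm check c) ?_ v
  intro w k _
  unfold pvTerm pvIdx
  split <;> simp

-- B's innermost loop: a conditional add of a constant
theorem pv_foldl_ite_addC {α : Type} (s : List α) (P : α → Prop) [DecidablePred P] (C : Int) (v : Int) :
    s.foldl (fun acc k => if P k then acc + C else acc) v
      = v + (s.map (fun k => if P k then C else 0)).sum := by
  refine pv_foldl_eq_sum s _ _ ?_ v
  intro w k _
  split <;> simp

-- double sums over two lists commute
theorem pv_sum_swap {α β : Type} (l1 : List α) (l2 : List β) (f : α → β → Int) :
    (l1.map (fun a => (l2.map (f a)).sum)).sum = (l2.map (fun b => (l1.map (fun a => f a b)).sum)).sum := by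
  induction l1 with
  | nil => induction l2 with
    | nil => simp
    | cons b t ih => simp_all
  | cons a t ih =>
    simp only [List.map_cons, List.sum_cons, ih]
    exact (PySem.List.sum_map_add_int l2 _ _).symm

-- idxOf? through an appended singleton
theorem pv_idxOf?_append (l : List Int) (x v : Int) :
    List.idxOf? v (l ++ [x]) = (List.idxOf? v l).or (if v = x then some l.length else none) := by
  show List.findIdx? (fun y => y == v) (l ++ [x])
      = (List.findIdx? (fun y => y == v) l).or (if v = x then some l.length else none)
  rw [List.findIdx?_append]
  congr 1
  by_cases h : v = x
  · subst h; simp [List.findIdx?_cons]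
  · simp [List.findIdx?_cons, List.findIdx?_nil, beq_iff_eq, Ne.symm h]
    exact h

theorem pv_mem_of_idxOf?_eq_some {l : List Int} {v : Int} {n : Nat}
    (h : List.idxOf? v l = some n) : v ∈ l := by
  rcases List.idxOf?_eq_some_iff.mp h with ⟨hlt, hv, _⟩
  exact hv ▸ List.getElem_mem hlt

-- the firstpos dictionary built by B's first loop
def pvFP (check : List Int) : PySem.Dict Int Int :=
  check.zipIdx.foldl (fun d vi => if d.contains vi.1 then d else d.insert vi.1 (vi.2 : Int)) PySem.Dict.empty

-- the counts dictionary built by B's first loop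
def pvCN (check : List Int) : PySem.Dict Int Int :=
  check.zipIdx.foldl (fun d vi => d.insert vi.1 (d.getD vi.1 0 + 1)) PySem.Dict.empty

theorem pv_fp_get? (check : List Int) : ∀ v : Int,
    (pvFP check).get? v = (List.idxOf? v check).map (fun n => (n : Int)) := by
  induction check using List.reverseRecOn with
  | nil => intro v; simp [pvFP, PySem.Dict.get?_empty]
  | append_singleton l x ih =>
    intro v
    have hfold : pvFP (l ++ [x])
        = (if (pvFP l).contains x then pvFP l else (pvFP l).insert x ((0 + l.length : Nat) : Int)) := by
      unfold pvFP
      rw [List.zipIdx_append, List.foldl_append]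
      simp [List.zipIdx_cons, List.zipIdx_nil]
    have hc : (pvFP l).contains x = decide (x ∈ l) := by
      rw [PySem.Dict.contains_eq_isSome_get?, ih x]
      rcases h : List.idxOf? x l with _ | n
      · simp [List.idxOf?_eq_none_iff.mp h]
      · simp [pv_mem_of_idxOf?_eq_some h]
    rw [hfold, hc, pv_idxOf?_append]
    by_cases hx : x ∈ l
    · simp only [hx, decide_true, if_true, ih v]
      rcases h : List.idxOf? v l with _ | n
      · have hvl : v ∉ l := List.idxOf?_eq_none_iff.mp h
        have hvx : v ≠ x := fun he => hvl (he ▸ hx)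
        simp [hvx]
      · simp [Option.some_or]
    · simp only [hx, decide_false, Bool.false_eq_true, if_false]
      by_cases hvx : v = x
      · subst hvx
        rw [PySem.Dict.get?_insert_self]
        have h0 : List.idxOf? v l = none := List.idxOf?_eq_none_iff.mpr hx
        simp [h0]
      · rw [PySem.Dict.get?_insert, if_neg hvx, ih v]
        rcases h : List.idxOf? v l with _ | n <;>
          simp [hvx]

theorem pv_fp_getD (check : List Int) (v : Int) :
    (pvFP check).getD v 0 = ((pvIdx check v : Nat) : Int) := by
  rw [PySem.Dict.getD_eq_get?_getD, pv_fp_get?]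
  unfold pvIdx PySem.List.index?
  cases List.idxOf? v check <;> simp

theorem pv_fp_contains (check : List Int) (v : Int) :
    (pvFP check).contains v = decide (v ∈ check) := by
  rw [PySem.Dict.contains_eq_isSome_get?, pv_fp_get?]
  rcases h : List.idxOf? v check with _ | n
  · simp [List.idxOf?_eq_none_iff.mp h]
  · simp [pv_mem_of_idxOf?_eq_some h]

theorem pv_cn_getD (check : List Int) (v : Int) :
    (pvCN check).getD v 0 = (check.count v : Int) := by
  have h2 : (check.zipIdx.map Prod.fst).foldl
        (fun (d : PySem.Dict Int Int) k => d.insert k (d.getD k 0 + 1)) PySem.Dict.empty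
      = check.zipIdx.foldl (fun d vi => d.insert vi.1 (d.getD vi.1 0 + 1)) PySem.Dict.empty := by
    rw [List.foldl_map]
  unfold pvCN
  rw [← h2, List.zipIdx_map_fst, PySem.Dict.getD_foldl_insert_add_one]
  simp

-- first-occurrence sum: summing a value-dependent term at the positions that are first
-- occurrences in p is a sum over the distinct values of p
theorem pv_firstsum (H : Nat → Int → Int) : ∀ (p : List Int),
    ((p.zipIdx.map (fun ij => if ij.1 ∈ p.take ij.2 then 0 else H ij.2 ij.1)).sum)
      = ∑ c ∈ p.toFinset, H (pvIdx p c) c := by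
  intro p
  induction p using List.reverseRecOn with
  | nil => simp
  | append_singleton l x ih =>
    rw [List.zipIdx_append, List.map_append, List.sum_append]
    have hold : (l.zipIdx.map (fun ij => if ij.1 ∈ (l ++ [x]).take ij.2 then 0 else H ij.2 ij.1))
        = (l.zipIdx.map (fun ij => if ij.1 ∈ l.take ij.2 then 0 else H ij.2 ij.1)) := by
      apply List.map_congr_left
      rintro ⟨a, j⟩ hij
      have hj := (List.mem_zipIdx hij).2.1
      rw [List.take_append_of_le_length (by omega)]
    have hnew : (([x].zipIdx (0 + l.length)).map
          (fun ij => if ij.1 ∈ (l ++ [x]).take ij.2 then 0 else H ij.2 ij.1))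
        = [if x ∈ l then 0 else H l.length x] := by
      simp only [List.zipIdx_cons, List.zipIdx_nil, List.map_cons, List.map_nil, Nat.zero_add]
      rw [show (l ++ [x]).take l.length = l from List.take_left]
    have hstable : ∀ c ∈ l.toFinset, H (pvIdx (l ++ [x]) c) c = H (pvIdx l c) c := by
      intro c hc
      have hcl : c ∈ l := List.mem_toFinset.mp hc
      have hi : List.idxOf? c (l ++ [x]) = List.idxOf? c l := by
        rw [pv_idxOf?_append]
        rcases h : List.idxOf? c l with _ | n
        · exact absurd (List.idxOf?_eq_none_iff.mp h) (by simpa using hcl)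
        · simp [Option.some_or]
      simp [pvIdx, PySem.List.index?, hi]
    rw [hold, hnew, ih]
    by_cases hx : x ∈ l
    · have hT : (l ++ [x]).toFinset = l.toFinset := by
        rw [List.toFinset_append]
        simp [hx]
      rw [hT]
      simp only [if_pos hx, List.sum_cons, List.sum_nil, add_zero]
      exact (Finset.sum_congr rfl hstable).symm
    · have hxt : x ∉ l.toFinset := by simpa using hx
      have hT : (l ++ [x]).toFinset = insert x l.toFinset := by
        rw [List.toFinset_append, Finset.insert_eq, Finset.union_comm]
        simp
      rw [hT, Finset.sum_insert hxt]
      have hxi : pvIdx (l ++ [x]) x = l.length := by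
        simp [pvIdx, PySem.List.index?, pv_idxOf?_append, List.idxOf?_eq_none_iff.mpr hx]
      rw [hxi, Finset.sum_congr rfl hstable]
      simp only [if_neg hx, List.sum_cons, List.sum_nil, add_zero]
      ring

-- the per-preference-list identity: A's contribution of p summed over check equals B's
-- first-occurrence sweep over p
theorem pv_perP (check p : List Int) :
    (check.map (fun c => if c ∈ p then pvG check p c else 0)).sum
      = (p.zipIdx.map (fun ij => if ij.1 ∈ p.take ij.2 ∨ ¬ (ij.1 ∈ check) then 0
          else (check.count ij.1 : Int) * ((p.drop (ij.2 + 1)).map (pvTerm check ij.1)).sum)).sum := by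
  have hR : (p.zipIdx.map (fun ij => if ij.1 ∈ p.take ij.2 ∨ ¬ (ij.1 ∈ check) then 0
          else (check.count ij.1 : Int) * ((p.drop (ij.2 + 1)).map (pvTerm check ij.1)).sum))
      = (p.zipIdx.map (fun ij => if ij.1 ∈ p.take ij.2 then 0 else
          (fun (j : Nat) (c : Int) => if c ∈ check then (check.count c : Int) * ((p.drop (j + 1)).map (pvTerm check c)).sum else 0) ij.2 ij.1)) := by
    apply List.map_congr_left
    rintro ⟨c, j⟩ _
    by_cases h1 : c ∈ p.take j
    · simp [h1]
    · by_cases h2 : c ∈ check <;> simp [h1, h2]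
  rw [hR, pv_firstsum (fun (j : Nat) (c : Int) => if c ∈ check then (check.count c : Int) * ((p.drop (j + 1)).map (pvTerm check c)).sum else 0) p]
  rw [Finset.sum_list_map_count check (fun c => if c ∈ p then pvG check p c else 0)]
  have hL : ∀ m ∈ check.toFinset,
      (List.count m check) • (if m ∈ p then pvG check p m else 0)
        = if m ∈ p then (check.count m : Int) * pvG check p m else 0 := by
    intro m _
    split <;> simp
  rw [Finset.sum_congr rfl hL, ← Finset.sum_filter, ← Finset.sum_filter]
  apply Finset.sum_congr
  · ext m
    simp only [Finset.mem_filter, List.mem_toFinset]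
    tauto
  · intro m hm
    have hmp : m ∈ p := List.mem_toFinset.mp (Finset.mem_filter.mp hm).1
    simp [pvG]

theorem pv_A_eval (prefs : List (List Int)) (check : List Int) :
    getViolations prefs check
      = (check.map (fun c => ((prefs.map (fun p => if c ∈ p then pvG check p c else 0)).sum))).sum := by
  unfold getViolations
  refine (pv_foldl_eq_sum check _
      (fun item => ((prefs.map (fun p => if item ∈ p then pvG check p item else 0)).sum)) ?_ 0).trans
    (zero_add _)
  intro v item _
  have hmid := PySem.List.foldl_pyRange_pyGetD (xs := prefs) (d := ([] : List Int))
      (f := fun acc p => if ¬ (item ∈ p) then acc else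
        (PySem.List.slice p (some ((((PySem.List.index? p item).getD 0 : Nat) : Int) + 1)) none).foldl
          (fun acc k =>
            if (PySem.List.index? check item).getD 0 < (PySem.List.index? check k).getD 0
            then acc + 1 else acc) acc)
      (init := v) (a := 0) (by norm_num)
  refine hmid.trans ?_
  refine pv_foldl_eq_sum _ _ (fun p => if item ∈ p then pvG check p item else 0) ?_ v
  intro w p _
  by_cases hp : item ∈ p
  · rw [if_neg (not_not_intro hp)]
    rw [show ((((PySem.List.index? p item).getD 0 : Nat) : Int) + 1)
          = ((((PySem.List.index? p item).getD 0 + 1 : Nat)) : Int) from by push_cast; ring]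
    rw [PySem.List.slice_from_natCast]
    rw [pv_foldl_term check item]
    simp [hp, pvG, pvIdx]
  · simp [hp]

theorem pv_B_eval (prefs : List (List Int)) (check : List Int) :
    getViolations_alt prefs check
      = (prefs.map (fun p => (p.zipIdx.map (fun ij => if ij.1 ∈ p.take ij.2 ∨ ¬ (ij.1 ∈ check) then 0
          else (check.count ij.1 : Int) * ((p.drop (ij.2 + 1)).map (pvTerm check ij.1)).sum)).sum)).sum := by
  have key : getViolations_alt prefs check
      = prefs.foldl (fun violations pref =>
          pref.zipIdx.foldl (fun violations ij =>
            if ij.1 ∈ pref.take ij.2 ∨ (pvFP check).contains ij.1 = false then violations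
            else (pref.drop (ij.2 + 1)).foldl (fun violations k =>
              if (pvFP check).getD ij.1 0 < (pvFP check).getD k 0
              then violations + (pvCN check).getD ij.1 0 else violations) violations)
            violations) 0 := by
    simp only [getViolations_alt]
    rw [PySem.List.foldl_prod_mk
      (f := fun (d : PySem.Dict Int Int) (vi : Int × Nat) =>
        if d.contains vi.1 then d else d.insert vi.1 (vi.2 : Int))
      (g := fun (d : PySem.Dict Int Int) (vi : Int × Nat) => d.insert vi.1 (d.getD vi.1 0 + 1))]
    rfl
  rw [key]
  refine (pv_foldl_eq_sum prefs _ _ ?_ 0).trans (zero_add _)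
  intro v p _
  refine pv_foldl_eq_sum _ _ _ ?_ v
  intro w ij _
  by_cases hg : ij.1 ∈ p.take ij.2 ∨ (pvFP check).contains ij.1 = false
  · rw [if_pos hg]
    have hg2 : ij.1 ∈ p.take ij.2 ∨ ¬ (ij.1 ∈ check) := by
      rcases hg with h | h
      · exact Or.inl h
      · right
        rw [pv_fp_contains] at h
        simpa using h
    rw [if_pos hg2, add_zero]
  · rw [if_neg hg]
    have h1 : ¬ (ij.1 ∈ p.take ij.2) := fun h => hg (Or.inl h)
    have hmem : ij.1 ∈ check := by
      by_contra hm
      exact hg (Or.inr (by rw [pv_fp_contains]; simpa using hm))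
    have hg2 : ¬ (ij.1 ∈ p.take ij.2 ∨ ¬ (ij.1 ∈ check)) := by
      rintro (h | h)
      · exact h1 h
      · exact h hmem
    rw [if_neg hg2]
    rw [pv_foldl_ite_addC (p.drop (ij.2 + 1))
      (fun k => (pvFP check).getD ij.1 0 < (pvFP check).getD k 0) ((pvCN check).getD ij.1 0) w]
    congr 1
    rw [pv_cn_getD]
    rw [show (fun k => if (pvFP check).getD ij.1 0 < (pvFP check).getD k 0
          then (check.count ij.1 : Int) else 0)
        = (fun k => (check.count ij.1 : Int) * pvTerm check ij.1 k) from ?_]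
    · rw [List.sum_map_mul_left]
    · funext k
      rw [pv_fp_getD, pv_fp_getD]
      unfold pvTerm
      by_cases hlt : pvIdx check ij.1 < pvIdx check k
      · simp [hlt]
      · simp [hlt]

-- ===== VERDICT (by name: the statement is the Claim_ definition above) =====
theorem getViolations_spec : Claim_equal_getViolations := by
  intro prefs check _ _
  unfold Spec_getViolations
  rw [pv_A_eval, pv_B_eval, pv_sum_swap]
  congr 1
  apply List.map_congr_left
  intro p _
  exact pv_perP check p
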